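-- pv_equiv track=rewrite | github.com/diegolopez2002/Project1 | basics.py | nthmax
-- ===== SOURCE A (Python) =====
-- def nthmax(n, a):
--
--      if n < 0:
--           return None
--
--      array = []
--      for item in a:
--           if item not in array:
--                array.append(item)
--
--      sorted_unique = sorted(array, reverse=True)
--
--      if n < len(sorted_unique):
--           return sorted_unique[n]
--      else:
--           return None
-- ===== SOURCE B (Python) =====
-- def nthmax(n, a):
--     if n < 0:
--         return None
--     vals = set(a)
--     if n >= len(vals):
--         return None
--     pick = None
--     for _ in range(n + 1):
--         pick = max(vals)
--         vals.discard(pick)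
--     return pick
-- ===== Notes on version B (the rewrite author's own statement) =====
-- stated objective: alternative
-- what changed: Replaces A's quadratic membership-list dedup plus full sort-then-index by a set dedup followed by partial selection: repeatedly take and discard the maximum n+1 times, returning the last pick (None if the set runs out).
import Mathlib
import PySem

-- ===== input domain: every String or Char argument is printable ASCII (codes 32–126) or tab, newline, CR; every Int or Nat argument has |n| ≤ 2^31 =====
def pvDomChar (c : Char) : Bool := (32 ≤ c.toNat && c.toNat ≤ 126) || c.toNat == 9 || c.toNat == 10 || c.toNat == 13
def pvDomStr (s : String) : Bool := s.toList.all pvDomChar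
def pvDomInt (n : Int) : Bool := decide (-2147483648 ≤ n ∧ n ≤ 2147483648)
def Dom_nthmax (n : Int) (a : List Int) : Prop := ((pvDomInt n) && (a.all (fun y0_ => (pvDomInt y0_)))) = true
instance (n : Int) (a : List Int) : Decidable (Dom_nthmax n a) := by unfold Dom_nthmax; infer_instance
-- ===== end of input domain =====

-- B dedups with a set and does partial selection by repeated max-and-discard instead of A's
-- membership-list dedup plus full descending sort and index (alternative algorithm, similar cost).


-- ===== PORT A =====
def nthmax (n : Int) (a : List Int) : Option Int :=
  if n < 0 then none
  else
    let array := a.foldl (fun acc item => if item ∈ acc then acc else acc ++ [item]) []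
    let sorted_unique := PySem.List.sorted array (fun x => x) true
    if n < (sorted_unique.length : Int) then PySem.List.pyGet? sorted_unique n
    else none

-- ===== PORT B =====
-- the 'for _ in range(n+1)' loop of Source B; the loop runs only with n < len(vals), so vals is
-- never empty when max is taken; max? = none (empty set) is therefore unreachable and maps to none
def nthmaxAltLoop : Nat → List Int → Option Int → Option Int
  | 0, _, pick => pick
  | k + 1, vals, _ =>
    match PySem.List.max? vals (fun x => x) with
    | none => none
    | some m => nthmaxAltLoop k (PySem.Set.discard vals m) (some m)

def nthmax_alt (n : Int) (a : List Int) : Option Int :=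
  if n < 0 then none
  else
    let vals := PySem.Set.ofList a
    if (vals.length : Int) ≤ n then none
    else nthmaxAltLoop (n + 1).toNat vals none

-- ===== PRECONDITION & SPEC =====
def Spec_nthmax (n : Int) (a : List Int) (out : Option Int) : Prop := out = nthmax_alt n a
instance (n : Int) (a : List Int) (out : Option Int) : Decidable (Spec_nthmax n a out) := by unfold Spec_nthmax; infer_instance

-- ===== CLAIM (what is proved, stated in full; the proofs are below) =====
def Claim_equal_nthmax : Prop := ∀ (n : Int) (a : List Int), Dom_nthmax n a → Spec_nthmax n a (nthmax n a)

-- ===== LEMMAS AND PROOFS =====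

theorem nthmax_add_eq (s : List Int) (x : Int) :
    (if x ∈ s then s else s ++ [x]) = PySem.Set.add s x := by
  simp [PySem.Set.add, PySem.Set.contains]

theorem nthmax_dedup_eq (a : List Int) (acc : List Int) :
    a.foldl (fun acc item => if item ∈ acc then acc else acc ++ [item]) acc
      = a.foldl PySem.Set.add acc := by
  induction a generalizing acc with
  | nil => rfl
  | cons x t ih => rw [List.foldl_cons, List.foldl_cons, nthmax_add_eq]; exact ih _

theorem nthmax_discard_nodup (vals : List Int) (m : Int) (h : vals.Nodup) :
    (PySem.Set.discard vals m).Nodup := by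
  simpa [PySem.Set.discard] using h.filter _

theorem nthmax_sorted_cons (vals : List Int) (m : Int) (hnd : vals.Nodup)
    (hm : PySem.List.max? vals (fun x => x) = some m) :
    PySem.List.sorted vals (fun x => x) true
      = m :: PySem.List.sorted (PySem.Set.discard vals m) (fun x => x) true := by
  have hmem : m ∈ vals := PySem.List.max?_mem hm
  have hmax : ∀ y ∈ vals, y ≤ m := by
    have := PySem.List.max?_isMax hm
    simpa using this
  have h2 : PySem.Set.discard vals m = vals.erase m := by
    rw [hnd.erase_eq_filter m]; rfl
  apply PySem.List.sorted_rev_eq_of_perm_of_pairwise_gt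
  · -- permutation
    have h1 : (PySem.List.sorted (PySem.Set.discard vals m) (fun x => x) true).Perm
        (PySem.Set.discard vals m) := PySem.List.sorted_perm _ _ _
    have h1' : (m :: PySem.List.sorted (PySem.Set.discard vals m) (fun x => x) true).Perm
        (m :: vals.erase m) := List.Perm.cons m (h2 ▸ h1)
    exact h1'.trans (List.perm_cons_erase hmem).symm
  · -- strict descent
    refine List.pairwise_cons.mpr ⟨?_, ?_⟩
    · intro y hy
      have hy' : y ∈ PySem.Set.discard vals m :=
        (PySem.List.sorted_perm _ _ _).mem_iff.mp hy
      rw [h2] at hy'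
      have hyv : y ∈ vals := List.mem_of_mem_erase hy'
      have hne : y ≠ m := by
        intro hEq; subst hEq
        exact (hnd.not_mem_erase (a := y)) hy'
      exact lt_of_le_of_ne (hmax y hyv) hne
    · have hle : (PySem.List.sorted (PySem.Set.discard vals m) (fun x => x) true).Pairwise
          (fun a b => b ≤ a) := by
        have := PySem.List.sorted_pairwise_rev (PySem.Set.discard vals m) (fun x => x)
        simpa using this
      have hnd' : (PySem.List.sorted (PySem.Set.discard vals m) (fun x => x) true).Nodup :=
        (PySem.List.sorted_perm _ _ _).nodup_iff.mpr (nthmax_discard_nodup vals m hnd)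
      exact (hle.and hnd').imp (fun h => lt_of_le_of_ne h.1 (Ne.symm h.2))

theorem nthmax_loop_eq (vals : List Int) (hnd : vals.Nodup) (k : Nat) (pick : Option Int) :
    nthmaxAltLoop (k + 1) vals pick = (PySem.List.sorted vals (fun x => x) true)[k]? := by
  match hmx : PySem.List.max? vals (fun x => x) with
  | none =>
    have hnil : vals = [] := (PySem.List.max?_eq_none_iff _ _).mp hmx
    subst hnil
    simp [nthmaxAltLoop, hmx, PySem.List.sorted]
  | some m =>
    have hcons := nthmax_sorted_cons vals m hnd hmx
    have hlen : (PySem.Set.discard vals m).length < vals.length := by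
      have hperm := (PySem.List.sorted_perm vals (fun x => x) true).length_eq
      rw [hcons] at hperm
      have := (PySem.List.sorted_perm (PySem.Set.discard vals m) (fun x => x) true).length_eq
      simp [List.length_cons, this] at hperm
      omega
    have hnd' := nthmax_discard_nodup vals m hnd
    have step : nthmaxAltLoop (k + 1) vals pick
        = nthmaxAltLoop k (PySem.Set.discard vals m) (some m) := by
      conv_lhs => rw [nthmaxAltLoop]
      rw [hmx]
    cases k with
    | zero => rw [step, hcons]; rfl
    | succ k' =>
      have ih := nthmax_loop_eq (PySem.Set.discard vals m) hnd' k' (some m)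
      rw [step, ih, hcons]
      simp
termination_by vals.length
decreasing_by exact hlen

-- ===== VERDICT (by name: the statement is the Claim_ definition above) =====
theorem nthmax_spec : Claim_equal_nthmax := by
  intro n a _
  unfold Spec_nthmax nthmax nthmax_alt
  by_cases hneg : n < 0
  · simp [hneg]
  · simp only [hneg, if_false]
    have harr : a.foldl (fun acc item => if item ∈ acc then acc else acc ++ [item]) []
        = PySem.Set.ofList a := by
      rw [nthmax_dedup_eq]; rfl
    have htn : (n + 1).toNat = n.toNat + 1 := by omega
    rw [harr]
    set su := PySem.List.sorted (PySem.Set.ofList a) (fun x => x) true with hsu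
    have hlen : su.length = (PySem.Set.ofList a).length :=
      (PySem.List.sorted_perm _ _ _).length_eq
    by_cases hlt : n < (su.length : Int)
    · have hge : ¬ ((PySem.Set.ofList a).length : Int) ≤ n := by omega
      simp only [hlt, if_true, hge, if_false]
      rw [htn, nthmax_loop_eq _ (PySem.Set.nodup_ofList a) n.toNat none, ← hsu]
      have hcast : n = ((n.toNat : Nat) : Int) := by omega
      have hpg := PySem.List.pyGet?_natCast su n.toNat
      rw [← hcast] at hpg
      exact hpg
    · have hge : ((PySem.Set.ofList a).length : Int) ≤ n := by omega
      simp [hlt, hge]
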